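-- pv_equiv track=rewrite | github.com/UsernameDP/TJHSST_ML | Q1Project/handleMissingValues.py | compute_mode_preserve_first
-- ===== SOURCE A (Python) =====
-- from collections import Counter
--
-- MISSING_TOKENS = {"", "na", "n/a", "null", "none", "nan", "?"}
--
-- def is_missing(val: str) -> bool:
--     if val is None:
--         return True
--     s = str(val).strip()
--     return s.lower() in MISSING_TOKENS
--
-- def compute_mode_preserve_first(rows, attr):
--     counts = Counter()
--     first_seen_index = {}
--     idx = 0
--     for r in rows:
--         raw = r.get(attr, "")
--         if is_missing(raw):
--             idx += 1
--             continue
--         val = str(raw).strip()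
--         counts[val] += 1
--         if val not in first_seen_index:
--             first_seen_index[val] = idx
--         idx += 1
--     if not counts:
--         return None
--     max_count = max(counts.values())
--     candidates = [v for v, c in counts.items() if c == max_count]
--     candidates.sort(key=lambda v: first_seen_index[v])
--     return candidates[0]
-- ===== SOURCE B (Python) =====
-- MISSING_TOKENS = {"", "na", "n/a", "null", "none", "nan", "?"}
--
-- def is_missing(val: str) -> bool:
--     if val is None:
--         return True
--     s = str(val).strip()
--     return s.lower() in MISSING_TOKENS
--
-- def compute_mode_preserve_first(rows, attr):
--     # One pass to count; then a single strict-'>' scan over the counter's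
--     # items (insertion order = first-seen order), so the first value reaching
--     # the maximal count wins -- no first_seen_index, no filter, no sort.
--     counts = {}
--     for r in rows:
--         raw = r.get(attr, "")
--         if is_missing(raw):
--             continue
--         val = str(raw).strip()
--         counts[val] = counts.get(val, 0) + 1
--     best_val = None
--     best_count = 0
--     for v, c in counts.items():
--         if c > best_count:
--             best_val, best_count = v, c
--     return best_val
-- ===== Notes on version B (the rewrite author's own statement) =====
-- stated objective: simpler
-- what changed: Drops the first_seen_index dict, the max/filter/sort selection and the idx counter: a plain dict counts values and one strict-'>' scan over its items (insertion order = first-seen order) picks the first value attaining the maximal count.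
import Mathlib
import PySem

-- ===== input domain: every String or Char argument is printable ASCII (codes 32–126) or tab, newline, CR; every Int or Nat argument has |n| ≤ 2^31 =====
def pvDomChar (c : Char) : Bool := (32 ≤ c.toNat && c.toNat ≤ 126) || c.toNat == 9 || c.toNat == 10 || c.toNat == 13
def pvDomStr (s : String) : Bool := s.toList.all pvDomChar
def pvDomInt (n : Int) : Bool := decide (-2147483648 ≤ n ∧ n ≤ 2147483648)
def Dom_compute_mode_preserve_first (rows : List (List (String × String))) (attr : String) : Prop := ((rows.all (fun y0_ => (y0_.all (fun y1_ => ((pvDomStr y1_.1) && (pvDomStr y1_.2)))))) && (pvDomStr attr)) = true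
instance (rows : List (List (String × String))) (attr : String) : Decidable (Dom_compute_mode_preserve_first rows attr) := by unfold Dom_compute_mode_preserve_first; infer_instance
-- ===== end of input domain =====

-- B replaces A's first_seen_index dict and max/filter/sort selection by one strict-'>' scan
-- over the counter's items (insertion order = first-seen order): simpler, same result.

-- ===== PORT A =====
def pvMissingTokens : List String := ["", "na", "n/a", "null", "none", "nan", "?"]

-- is_missing: here `val` always IS a str (r.get(attr, "") with a str default), so the
-- `val is None` branch never fires and str(val) = val; exact on that domain.
def pvIsMissing (val : String) : Bool :=
  let s := PySem.Str.strip val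
  pvMissingTokens.contains (PySem.Str.lower s)

-- one iteration of A's `for r in rows` loop over the state (counts, first_seen_index, idx)
def pvStepA (attr : String) (st : PySem.Dict String Int × PySem.Dict String Int × Int)
    (r : List (String × String)) : PySem.Dict String Int × PySem.Dict String Int × Int :=
  let raw := (PySem.Dict.mk r).getD attr ""
  if pvIsMissing raw then (st.1, st.2.1, st.2.2 + 1)
  else
    let val := PySem.Str.strip raw
    (st.1.modify val 0 (· + 1),
     (if st.2.1.contains val then st.2.1 else st.2.1.insert val st.2.2),
     st.2.2 + 1)

def compute_mode_preserve_first (rows : List (List (String × String))) (attr : String) : Option String :=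
  let st := rows.foldl (pvStepA attr)
    ((PySem.Dict.empty : PySem.Dict String Int), (PySem.Dict.empty : PySem.Dict String Int), (0 : Int))
  let counts := st.1
  let fsi := st.2.1
  -- `if not counts: return None` + `max_count = max(counts.values())`: max? is none exactly when counts is empty
  match PySem.List.max? counts.values (fun v => v) with
  | none => none
  | some max_count =>
    let candidates := (counts.items.filter (fun p => p.2 == max_count)).map (·.1)
    -- key=lambda v: first_seen_index[v]: every candidate is a key of fsi, so getD's default is never read
    (PySem.List.sorted candidates (fun v => fsi.getD v 0) false).head?

-- ===== PORT B =====
-- one iteration of B's counting loop (counts[val] = counts.get(val, 0) + 1)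
def pvStepB (attr : String) (d : PySem.Dict String Int) (r : List (String × String)) :
    PySem.Dict String Int :=
  let raw := (PySem.Dict.mk r).getD attr ""
  if pvIsMissing raw then d
  else
    let val := PySem.Str.strip raw
    d.insert val (d.getD val 0 + 1)

def compute_mode_preserve_first_alt (rows : List (List (String × String))) (attr : String) : Option String :=
  let counts := rows.foldl (pvStepB attr) (PySem.Dict.empty : PySem.Dict String Int)
  (counts.items.foldl
    (fun best p => if p.2 > best.2 then (some p.1, p.2) else best)
    ((none : Option String), (0 : Int))).1

-- ===== PRECONDITION & SPEC =====
def Spec_compute_mode_preserve_first (rows : List (List (String × String))) (attr : String) (out : Option String) : Prop := out = compute_mode_preserve_first_alt rows attr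
instance (rows : List (List (String × String))) (attr : String) (out : Option String) : Decidable (Spec_compute_mode_preserve_first rows attr out) := by unfold Spec_compute_mode_preserve_first; infer_instance

-- ===== CLAIM (what is proved, stated in full; the proofs are below) =====
def Claim_equal_compute_mode_preserve_first : Prop := ∀ (rows : List (List (String × String))) (attr : String), Dom_compute_mode_preserve_first rows attr → Spec_compute_mode_preserve_first rows attr (compute_mode_preserve_first rows attr)

-- ===== LEMMAS AND PROOFS =====

-- the list of non-missing stripped values, in row order
def pvVals (rows : List (List (String × String))) (attr : String) : List String :=
  ((rows.map (fun r => (PySem.Dict.mk r).getD attr "")).filter (fun raw => !pvIsMissing raw)).map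
    PySem.Str.strip

lemma pvA_counts (attr : String) (rows : List (List (String × String)))
    (c f : PySem.Dict String Int) (i : Int) :
    (rows.foldl (pvStepA attr) (c, f, i)).1
      = (pvVals rows attr).foldl (fun d x => d.modify x 0 (· + 1)) c := by
  induction rows generalizing c f i with
  | nil => simp [pvVals]
  | cons r t ih =>
    simp only [List.foldl_cons, pvStepA, pvVals, List.map_cons, List.filter_cons]
    by_cases h : pvIsMissing ((PySem.Dict.mk r).getD attr "") = true
    · simp [h, ih, pvVals]
    · simp only [Bool.not_eq_true] at h
      simp [h, ih, pvVals]

lemma pvB_counts (attr : String) (rows : List (List (String × String)))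
    (c : PySem.Dict String Int) :
    rows.foldl (pvStepB attr) c
      = (pvVals rows attr).foldl (fun d x => d.insert x (d.getD x 0 + 1)) c := by
  induction rows generalizing c with
  | nil => simp [pvVals]
  | cons r t ih =>
    simp only [List.foldl_cons, pvStepB, pvVals, List.map_cons, List.filter_cons]
    by_cases h : pvIsMissing ((PySem.Dict.mk r).getD attr "") = true
    · simp [h, ih, pvVals]
    · simp only [Bool.not_eq_true] at h
      simp [h, ih, pvVals]

-- invariant carried by A's loop: counts and first_seen_index have the same keys,
-- first_seen_index's values are strictly increasing and below idx, counts' values ≥ 1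
def pvInv (c f : PySem.Dict String Int) (i : Int) : Prop :=
  c.keys = f.keys ∧ f.keys.Nodup ∧ f.items.Pairwise (fun p q => p.2 < q.2) ∧
    (∀ p ∈ f.items, p.2 < i) ∧ (∀ k, c.contains k = true → 1 ≤ c.getD k 0)

lemma pvInv_step (attr : String) (r : List (String × String))
    (c f : PySem.Dict String Int) (i : Int) (h : pvInv c f i) :
    pvInv (pvStepA attr (c, f, i) r).1 (pvStepA attr (c, f, i) r).2.1 (pvStepA attr (c, f, i) r).2.2 := by
  obtain ⟨hkeys, hnd, hpw, hlt, hge⟩ := h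
  simp only [pvStepA]
  by_cases hm : pvIsMissing ((PySem.Dict.mk r).getD attr "") = true
  · simp only [hm, if_true]
    exact ⟨hkeys, hnd, hpw, fun p hp => by have := hlt p hp; omega, hge⟩
  · simp only [hm, if_false, Bool.false_eq_true]
    set val := PySem.Str.strip ((PySem.Dict.mk r).getD attr "") with hval
    have hcf : c.contains val = f.contains val := by
      by_cases hv : val ∈ f.keys
      · rw [(PySem.Dict.contains_iff_mem_keys c val).2 (hkeys ▸ hv),
            (PySem.Dict.contains_iff_mem_keys f val).2 hv]
      · have h1 : c.contains val = false := by
          rw [← Bool.not_eq_true]; intro hc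
          exact hv (hkeys ▸ (PySem.Dict.contains_iff_mem_keys c val).1 hc)
        have h2 : f.contains val = false := by
          rw [← Bool.not_eq_true]; intro hc
          exact hv ((PySem.Dict.contains_iff_mem_keys f val).1 hc)
        rw [h1, h2]
    have hcnt : ∀ k, (c.modify val 0 (· + 1)).contains k = true →
        1 ≤ (c.modify val 0 (· + 1)).getD k 0 := by
      intro k hk
      rw [PySem.Dict.getD_modify]
      by_cases hkv : k = val
      · have : 0 ≤ c.getD val 0 := by
          by_cases hc : c.contains val = true
          · have := hge val hc; omega
          · rw [PySem.Dict.getD_of_not_contains c 0 (by simpa using hc)]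
        simp only [if_pos hkv]; omega
      · rw [if_neg hkv]
        apply hge k
        rw [PySem.Dict.contains_modify] at hk
        simpa [hkv] using hk
    by_cases hcv : f.contains val = true
    · simp only [hcv, if_true]
      refine ⟨?_, hnd, hpw, fun p hp => by have := hlt p hp; omega, hcnt⟩
      rw [PySem.Dict.keys_modify, PySem.Dict.keys_insert_of_contains c _ (hcf.trans hcv)]
      exact hkeys
    · simp only [hcv, if_false, Bool.false_eq_true]
      have hcv' : c.contains val = false := by rw [hcf]; simpa using hcv
      have hfv : f.contains val = false := by simpa using hcv
      refine ⟨?_, ?_, ?_, ?_, hcnt⟩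
      · rw [PySem.Dict.keys_modify, PySem.Dict.keys_insert_of_not_contains c _ hcv',
            PySem.Dict.keys_insert_of_not_contains f _ hfv, hkeys]
      · exact PySem.Dict.nodup_keys_insert f val i hnd
      · rw [PySem.Dict.items_insert_of_not_contains f i hfv]
        rw [List.pairwise_append]
        exact ⟨hpw, List.pairwise_singleton _ _, fun p hp q hq => by
          simp only [List.mem_singleton] at hq
          subst hq; exact hlt p hp⟩
      · intro p hp
        rw [PySem.Dict.items_insert_of_not_contains f i hfv] at hp
        rcases List.mem_append.1 hp with hp | hp
        · have := hlt p hp; omega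
        · simp only [List.mem_singleton] at hp; subst hp; simp

lemma pvInv_fold (attr : String) (rows : List (List (String × String)))
    (c f : PySem.Dict String Int) (i : Int) (h : pvInv c f i) :
    pvInv (rows.foldl (pvStepA attr) (c, f, i)).1
      (rows.foldl (pvStepA attr) (c, f, i)).2.1
      (rows.foldl (pvStepA attr) (c, f, i)).2.2 := by
  induction rows generalizing c f i with
  | nil => exact h
  | cons r t ih =>
    have := pvInv_step attr r c f i h
    simpa [List.foldl_cons] using ih _ _ _ this

-- B's strict-'>' scan returns the first pair attaining the running maximum
lemma pvScan (l : List (String × Int)) (bv : Option String) (bc : Int) :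
    (l.foldl (fun best p => if p.2 > best.2 then (some p.1, p.2) else best) (bv, bc)).1
      = if bc < l.foldl (fun a p => max a p.2) bc then
          (l.find? (fun p => p.2 == l.foldl (fun a p => max a p.2) bc)).map (·.1)
        else bv := by
  induction l generalizing bv bc with
  | nil => simp
  | cons p t ih =>
    simp only [List.foldl_cons, List.find?_cons]
    by_cases hp : p.2 > bc
    · have hmax : max bc p.2 = p.2 := by omega
      simp only [if_pos hp, hmax]
      rw [ih]
      have hle := (PySem.List.le_foldl_max_int t (fun q : String × Int => q.2) p.2).1
      by_cases hM : p.2 = List.foldl (fun a q => max a q.2) p.2 t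
      · rw [if_neg (by omega), if_pos (by omega), ← hM]
        simp
      · have hne : (p.2 == List.foldl (fun a q => max a q.2) p.2 t) = false := by
          simp; omega
        rw [if_pos (by omega), if_pos (by omega)]
        simp only [hne]
    · have hmax : max bc p.2 = bc := by omega
      simp only [if_neg hp, hmax]
      rw [ih]
      by_cases hb : bc < List.foldl (fun a q => max a q.2) bc t
      · have hne : (p.2 == List.foldl (fun a q => max a q.2) bc t) = false := by
          have := (PySem.List.le_foldl_max_int t (fun q : String × Int => q.2) bc).1
          simp; omega
        rw [if_pos hb, if_pos hb]
        simp only [hne]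
      · rw [if_neg hb, if_neg hb]

-- ===== VERDICT (by name: the statement is the Claim_ definition above) =====
lemma pvInv_init : pvInv (PySem.Dict.empty : PySem.Dict String Int)
    (PySem.Dict.empty : PySem.Dict String Int) 0 := by
  refine ⟨rfl, ?_, ?_, ?_, ?_⟩ <;> simp [PySem.Dict.keys, PySem.Dict.empty]

theorem compute_mode_preserve_first_spec : Claim_equal_compute_mode_preserve_first := by
  intro rows attr _
  unfold Spec_compute_mode_preserve_first
  simp only [compute_mode_preserve_first, compute_mode_preserve_first_alt]
  set st := rows.foldl (pvStepA attr)
    ((PySem.Dict.empty : PySem.Dict String Int), (PySem.Dict.empty : PySem.Dict String Int), (0 : Int)) with hst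
  have hC : st.1 = PySem.Dict.counter (pvVals rows attr) := by
    rw [hst, pvA_counts, PySem.Dict.counter_eq_foldl]
  have hB : rows.foldl (pvStepB attr) (PySem.Dict.empty : PySem.Dict String Int)
      = PySem.Dict.counter (pvVals rows attr) := by
    rw [pvB_counts, PySem.Dict.foldl_insert_getD_add_one_eq_counter]
  have hinv : pvInv st.1 st.2.1 st.2.2 := by
    rw [hst]; exact pvInv_fold attr rows _ _ _ pvInv_init
  set K := PySem.Dict.counter (pvVals rows attr) with hK
  rw [hC] at hinv ⊢
  rw [hB]
  obtain ⟨hkeys, hnd, hpw, hlt, hge⟩ := hinv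
  have hnodupK : K.keys.Nodup := hkeys ▸ hnd
  rcases hitems : K.items with _ | ⟨p, t⟩
  · have hv : K.values = [] := by
      show K.items.map (·.2) = []
      rw [hitems]; rfl
    rw [hv]
    simp [PySem.List.max?]
  · have hv : K.values = p.2 :: t.map (·.2) := by
      show K.items.map (·.2) = _
      rw [hitems]; rfl
    have hpmem : p ∈ K.items := by rw [hitems]; exact List.mem_cons_self
    have h1 : 1 ≤ p.2 := by
      have hc : K.contains p.1 = true :=
        (PySem.Dict.contains_iff_mem_keys K p.1).2 (PySem.Dict.mem_keys_of_mem_items K hpmem)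
      have := hge p.1 hc
      rwa [PySem.Dict.getD_of_mem_items K hpmem hnodupK 0] at this
    rw [hv, PySem.List.max?_id_cons]
    -- the two maxima coincide
    have hmc : (t.map (·.2)).foldl max p.2 = t.foldl (fun a (q : String × Int) => max a q.2) p.2 :=
      by rw [List.foldl_map]
    have hM0 : (p :: t).foldl (fun a (q : String × Int) => max a q.2) 0
        = t.foldl (fun a (q : String × Int) => max a q.2) p.2 := by
      rw [List.foldl_cons]
      congr 1
      omega
    have hle := (PySem.List.le_foldl_max_int t (fun q : String × Int => q.2) p.2).1
    -- B's scan
    rw [pvScan, hM0, if_pos (by omega)]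
    -- A's candidate list is already in first-seen order, strictly increasing under the sort key
    have hFkeys : K.keys.Pairwise (fun a b => st.2.1.getD a 0 < st.2.1.getD b 0) := by
      rw [hkeys]
      show (st.2.1.items.map (·.1)).Pairwise _
      rw [List.pairwise_map]
      exact hpw.imp_of_mem (fun {a b} ha hb hr => by
        rw [PySem.Dict.getD_of_mem_items st.2.1 ha hnd 0,
            PySem.Dict.getD_of_mem_items st.2.1 hb hnd 0]
        exact hr)
    have hsub : (((p :: t).filter (fun q => q.2 == (t.map (·.2)).foldl max p.2)).map (·.1))
        |>.Sublist K.keys := by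
      have : K.keys = K.items.map (·.1) := rfl
      rw [this, hitems]
      exact List.Sublist.map _ List.filter_sublist
    have hpairC := (hFkeys.sublist hsub).imp (fun {a b} hr => le_of_lt hr)
    show (PySem.List.sorted
        ((List.filter (fun q => q.2 == (t.map (·.2)).foldl max p.2) (p :: t)).map (·.1))
        (fun v => st.2.1.getD v 0)).head? = _
    rw [PySem.List.sorted_eq_self_of_pairwise _ _ hpairC]
    rw [List.head?_map, List.head?_filter, hmc]
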